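-- pv_equiv track=rewrite | github.com/TomasTeixeira2003/Foundations-of-Programming | 1ºProjeto/Proj1.py | corrigir_doc
-- ===== SOURCE A (Python) =====
-- def corrigir_palavra(cad_caracteres):
--     """
--     cad_caracteres -> cad_caracteres
--     Recebe uma cadeia de carateres que representa uma palavra (potencialmente \
--     modificada por um surto de letras) e devolve a cadeia de carateres corrigida
--     Autor: Tomás Sobral Teixeira
--     """
--     lista_caracteres = list(cad_caracteres)
--     for i in range(len(lista_caracteres)//2):
--         contador = 0
--         comp_lista = len(lista_caracteres)
--         while contador < comp_lista - 1:
--             if ord(lista_caracteres[contador]) == ord(lista_caracteres[contador + 1]) + ord('A') - ord('a') or \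
--                     ord(lista_caracteres[contador]) + ord('A') - ord('a') == ord(lista_caracteres[contador + 1]):# Transforma as letras em maiúsculas
--                 del(lista_caracteres[contador:contador + 2])
--                 contador += 1
--                 comp_lista -= 2
--             else:
--                 contador += 1
--     nova_cad_caracteres = ''
--     for i in lista_caracteres:
--         nova_cad_caracteres = nova_cad_caracteres + i
--     return nova_cad_caracteres
--
-- def eh_anagrama(cadeia1, cadeia2):
--     """
--     cad_caracteres X cad_caracteres -> booleano
--     Recebe duas cadeias de carateres correspondentes a duas palavras e devolve \
--     True se e só se uma é anagrama da outra
--     Autor: Tomás Sobral Teixeira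
--     """
--     cadeia1_min = cadeia1.lower()
--     cadeia2_min = cadeia2.lower()
--     lista_ordenada1 = sorted(cadeia1_min)
--     lista_ordenada2 = sorted(cadeia2_min)
--     cadeia_ordenada1 = "".join(lista_ordenada1) # Transformei ambas as strings em listas, organizei-as e tranformeias em strings novamente
--     cadeia_ordenada2 = "".join(lista_ordenada2)
--     if cadeia_ordenada1 == cadeia_ordenada2:
--         return True
--     else:
--         return False
--
-- def corrigir_doc(cadeia_caracteres):
--     """
--     cad_caracteres -> cad_caracteres
--     Recebe uma cadeia de carateres que representa o texto com erros da documentação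
--     da BDB e devolve a cadeia de carateres filtrada com as palavras corrigidas e os
--     anagramas retirados, ficando apenas a sua primeira ocorrência
--     Autor: Tomás Sobral Teixeira
--     """
--     def validar_argumento123(cadeia_caracteres):
--         """
--         cad_caracteres
--         Recebe uma cadeia de caracteres e verifica se é ou não um argumento válido
--         Autor: Tomás Sobral Teixeira
--         """
--         if type(cadeia_caracteres) != str:
--             raise ValueError('corrigir_doc: argumento invalido')
--         for letra in cadeia_caracteres:
--             if ord(letra) != 32 and ord(letra) not in range(65, 91) and ord(letra) not in range(97, 123):
--                 raise ValueError('corrigir_doc: argumento invalido')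
--         if cadeia_caracteres == '' or cadeia_caracteres == ' ':
--             raise ValueError('corrigir_doc: argumento invalido')
--         for letra in range(len(cadeia_caracteres) - 1):
--             if cadeia_caracteres[letra] == cadeia_caracteres[letra + 1] == ' ':  # Dois espaços seguidos
--                 raise ValueError('corrigir_doc: argumento invalido')
--         if cadeia_caracteres[0] == ' ':
--             raise ValueError('corrigir_doc: argumento invalido')
--         if cadeia_caracteres[len(cadeia_caracteres) - 1] == ' ':
--             raise ValueError('corrigir_doc: argumento invalido')
--
--     validar_argumento123(cadeia_caracteres)
--     lista_cad = cadeia_caracteres.rsplit(' ') # Divide a frase em palavras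
--     for i in range(len(lista_cad)):
--         lista_cad[i] = corrigir_palavra(lista_cad[i])
--     for el in range(len(lista_cad) - 1):
--         for i in range(el + 1, len(lista_cad)):
--             if lista_cad[el].lower() == lista_cad[i].lower():
--                 pass
--             elif eh_anagrama(lista_cad[el], lista_cad[i]):
--                 lista_cad[i] = '1'
--     lista_correta = []
--     for el in lista_cad:
--         if el != '1':
--             lista_correta += [el]
--     frase_correta = " ".join(lista_correta) # Transforma a lista_correta numa string com espacos entre elementos
--     return frase_correta
-- ===== SOURCE B (Python) =====
-- def corrigir_doc(cadeia_caracteres):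
--     """
--     Faster re-implementation: each word is corrected with a single stack pass
--     (cancelling adjacent same-letter opposite-case pairs), and anagram
--     duplicates are dropped in one pass over the words using a dictionary
--     keyed by the sorted-lowercase signature, which remembers the lowercase
--     form of the signature's first occurrence (words whose lowercase equals
--     that form are kept, other anagrams are dropped).
--     """
--     if type(cadeia_caracteres) != str \
--             or not cadeia_caracteres \
--             or any(not (c == ' ' or 'a' <= c <= 'z' or 'A' <= c <= 'Z')
--                    for c in cadeia_caracteres) \
--             or '' in cadeia_caracteres.split(' '):
--         raise ValueError('corrigir_doc: argumento invalido')
--     first = {}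
--     out = []
--     for word in cadeia_caracteres.split(' '):
--         stack = []
--         for c in word:
--             if stack and stack[-1] != c and stack[-1].lower() == c.lower():
--                 stack.pop()
--             else:
--                 stack.append(c)
--         corrected = ''.join(stack)
--         low = corrected.lower()
--         sig = ''.join(sorted(low))
--         if sig not in first:
--             first[sig] = low
--             out.append(corrected)
--         elif first[sig] == low:
--             out.append(corrected)
--     return ' '.join(out)
-- ===== Notes on version B (the rewrite author's own statement) =====
-- stated objective: faster
-- what changed: Each word is corrected by a single stack pass that cancels adjacent opposite-case pairs instead of repeated quadratic deletion sweeps, and anagram duplicates are removed in one pass with a dictionary keyed by the sorted-lowercase signature (storing the lowercase of its first occurrence) instead of comparing every pair of words.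
import Mathlib
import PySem

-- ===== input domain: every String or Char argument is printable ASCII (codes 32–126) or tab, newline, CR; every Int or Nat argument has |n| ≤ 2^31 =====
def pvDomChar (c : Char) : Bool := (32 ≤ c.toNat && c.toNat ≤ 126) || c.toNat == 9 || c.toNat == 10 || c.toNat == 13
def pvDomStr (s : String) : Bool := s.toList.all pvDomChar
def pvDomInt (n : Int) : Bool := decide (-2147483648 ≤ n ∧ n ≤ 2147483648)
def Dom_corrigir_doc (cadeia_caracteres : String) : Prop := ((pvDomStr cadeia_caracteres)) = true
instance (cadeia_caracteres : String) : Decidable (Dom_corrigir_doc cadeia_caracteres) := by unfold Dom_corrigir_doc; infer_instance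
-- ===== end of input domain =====

-- B corrects each word with one stack pass and removes anagram duplicates with one
-- dictionary pass keyed by the sorted-lowercase signature (objective: faster).

-- ===== PORT A =====
-- the "ord(...) == ord(...) + ord('A') - ord('a')" test of corrigir_palavra
def pvMatchA (c d : Char) : Bool :=
  ((c.toNat : Int) == (d.toNat : Int) + 65 - 97) || ((c.toNat : Int) + 65 - 97 == (d.toNat : Int))

-- the inner "while contador < comp_lista - 1" loop of corrigir_palavra
-- (both reads are in range whenever the loop body runs, so getD's default is never used)
def pvPassAux (lista : List Char) (contador comp : Nat) : List Char :=
  if contador < comp - 1 then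
    if pvMatchA (lista.getD contador ' ') (lista.getD (contador + 1) ' ') then
      pvPassAux (lista.take contador ++ lista.drop (contador + 2)) (contador + 1) (comp - 2)
    else
      pvPassAux lista (contador + 1) comp
  else lista
termination_by comp - contador
decreasing_by all_goals omega

def corrigir_palavra (cad_caracteres : String) : String :=
  let lista := cad_caracteres.toList
  let lista := (List.range (lista.length / 2)).foldl (fun cur _ => pvPassAux cur 0 cur.length) lista
  String.ofList (lista.foldl (fun acc c => acc ++ [c]) [])

def eh_anagrama (cadeia1 cadeia2 : String) : Bool :=
  let lista_ordenada1 := PySem.List.sorted (PySem.Str.lower cadeia1).toList (fun c => c)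
  let lista_ordenada2 := PySem.List.sorted (PySem.Str.lower cadeia2).toList (fun c => c)
  let cadeia_ordenada1 := PySem.Chars.join [] (lista_ordenada1.map (fun c => [c]))
  let cadeia_ordenada2 := PySem.Chars.join [] (lista_ordenada2.map (fun c => [c]))
  if cadeia_ordenada1 == cadeia_ordenada2 then true else false

-- the inner "for i in range(el + 1, len(lista_cad))" loop of corrigir_doc
def pvInnerApp (l : List String) (el n : Int) : List String :=
  (PySem.List.pyRange (el + 1) n 1).foldl (fun l i =>
    if PySem.Str.lower (PySem.List.pyGetD l el "") == PySem.Str.lower (PySem.List.pyGetD l i "") then l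
    else if eh_anagrama (PySem.List.pyGetD l el "") (PySem.List.pyGetD l i "") then
      PySem.List.pySetD l i "1"
    else l) l

-- the nested anagram-marking loops (len(lista_cad) never changes: set keeps the length)
def pvAnagramMark (lista : List String) : List String :=
  let n : Int := lista.length
  (PySem.List.pyRange 0 (n - 1) 1).foldl (fun l el => pvInnerApp l el n) lista

-- port of A; the ValueError paths of validar_argumento123 are exactly the inputs excluded by Pre_corrigir_doc
def corrigir_doc (cadeia_caracteres : String) : String :=
  let lista_cad := (PySem.Str.split? cadeia_caracteres " ").getD []
  let lista_cad := lista_cad.map corrigir_palavra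
  let lista_cad := pvAnagramMark lista_cad
  let lista_correta := lista_cad.foldl (fun acc el => if el != "1" then acc ++ [el] else acc) ([] : List String)
  PySem.Str.join " " lista_correta

-- ===== PORT B =====
-- "stack and stack[-1] != c and stack[-1].lower() == c.lower()"
def pvMatchB (t c : Char) : Bool := t != c && (PySem.Chars.lowerChar t == PySem.Chars.lowerChar c)

-- one step of Source B's stack loop (stack kept top-first, reversed at the end)
def pvStackStep (stk : List Char) (c : Char) : List Char :=
  match stk with
  | t :: rest => if pvMatchB t c then rest else c :: t :: rest
  | [] => [c]

def pvCorrectWord (w : String) : String :=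
  String.ofList (w.toList.foldl pvStackStep []).reverse

-- one step of Source B's dictionary pass
def pvDictStep (st : PySem.Dict String String × List String) (w : String) : PySem.Dict String String × List String :=
  let low := PySem.Str.lower w
  let sig := String.ofList (PySem.List.sorted low.toList (fun c => c))
  match st.1.get? sig with
  | none => (st.1.insert sig low, st.2 ++ [w])
  | some v => if v == low then (st.1, st.2 ++ [w]) else (st.1, st.2)

-- port of B (Source B); its ValueError path is exactly the inputs excluded by Pre_corrigir_doc
def corrigir_doc_alt (cadeia_caracteres : String) : String :=
  let words := (PySem.Str.split? cadeia_caracteres " ").getD []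
  let res := words.foldl (fun st w => pvDictStep st (pvCorrectWord w)) (PySem.Dict.empty, ([] : List String))
  PySem.Str.join " " res.2

-- ===== PRECONDITION & SPEC =====
-- Pre_ excludes exactly the inputs on which A's validar_argumento123 raises ValueError
-- (a character that is not a letter or a space, the empty string, a leading,
-- trailing or doubled space); Source B raises ValueError on the same inputs.
def Pre_corrigir_doc (cadeia_caracteres : String) : Prop :=
  cadeia_caracteres.toList ≠ [] ∧
  (cadeia_caracteres.toList.all fun c =>
     (c == ' ') || (65 ≤ c.toNat && c.toNat ≤ 90) || (97 ≤ c.toNat && c.toNat ≤ 122)) = true ∧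
  cadeia_caracteres.toList.head? ≠ some ' ' ∧
  cadeia_caracteres.toList.getLast? ≠ some ' ' ∧
  PySem.Str.isIn "  " cadeia_caracteres = false

instance (cadeia_caracteres : String) : Decidable (Pre_corrigir_doc cadeia_caracteres) := by
  unfold Pre_corrigir_doc; infer_instance

def pvWitness_corrigir_doc : String := "Baa ab aab ba"

def Spec_corrigir_doc (cadeia_caracteres : String) (out : String) : Prop := out = corrigir_doc_alt cadeia_caracteres
instance (cadeia_caracteres : String) (out : String) : Decidable (Spec_corrigir_doc cadeia_caracteres out) := by unfold Spec_corrigir_doc; infer_instance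

-- ===== CLAIM (what is proved, stated in full; the proofs are below) =====
def Claim_equal_corrigir_doc : Prop := ∀ (cadeia_caracteres : String), Dom_corrigir_doc cadeia_caracteres → Pre_corrigir_doc cadeia_caracteres → Spec_corrigir_doc cadeia_caracteres (corrigir_doc cadeia_caracteres)

-- ===== LEMMAS AND PROOFS =====

def pvLet (c : Char) : Prop := (65 ≤ c.toNat ∧ c.toNat ≤ 90) ∨ (97 ≤ c.toNat ∧ c.toNat ≤ 122)

theorem pvUpper_iff (c : Char) : PySem.Chars.isupper c = true ↔ (65 ≤ c.toNat ∧ c.toNat ≤ 90) := by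
  simp only [PySem.Chars.isupper, Bool.and_eq_true, decide_eq_true_eq, Char.le_def]
  constructor
  · rintro ⟨h1, h2⟩
    exact ⟨UInt32.le_iff_toNat_le.mp h1, UInt32.le_iff_toNat_le.mp h2⟩
  · rintro ⟨h1, h2⟩
    exact ⟨UInt32.le_iff_toNat_le.mpr h1, UInt32.le_iff_toNat_le.mpr h2⟩

theorem pvLower_toNat (c : Char) :
    (PySem.Chars.lowerChar c).toNat = if 65 ≤ c.toNat ∧ c.toNat ≤ 90 then c.toNat + 32 else c.toNat := by
  simp only [PySem.Chars.lowerChar]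
  by_cases h : PySem.Chars.isupper c = true
  · rw [if_pos h, if_pos ((pvUpper_iff c).mp h), Char.toNat_ofNat,
      if_pos (Or.inl (by have := ((pvUpper_iff c).mp h).2; omega))]
  · rw [if_neg h, if_neg (fun hc => h ((pvUpper_iff c).mpr hc))]

theorem pvChar_eq_iff {c d : Char} : c = d ↔ c.toNat = d.toNat :=
  ⟨fun h => h ▸ rfl, fun h => Char.ext (UInt32.toNat_inj.mp h)⟩

theorem pvMatchB_iff {t c : Char} :
    pvMatchB t c = true ↔ t.toNat ≠ c.toNat ∧ (PySem.Chars.lowerChar t).toNat = (PySem.Chars.lowerChar c).toNat := by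
  simp only [pvMatchB, Bool.and_eq_true, bne_iff_ne, beq_iff_eq]
  constructor
  · rintro ⟨h1, h2⟩
    exact ⟨fun e => h1 (pvChar_eq_iff.mpr e), pvChar_eq_iff.mp h2⟩
  · rintro ⟨h1, h2⟩
    exact ⟨fun e => h1 (pvChar_eq_iff.mp e), pvChar_eq_iff.mpr h2⟩

theorem pvMatchB_symm (a b : Char) : pvMatchB a b = pvMatchB b a := by
  rcases hab : pvMatchB b a with _ | _
  · rcases h : pvMatchB a b with _ | _
    · rfl
    · obtain ⟨h1, h2⟩ := pvMatchB_iff.mp h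
      exact absurd (pvMatchB_iff.mpr ⟨fun e => h1 e.symm, h2.symm⟩) (by rw [hab]; simp)
  · obtain ⟨h1, h2⟩ := pvMatchB_iff.mp hab
    exact pvMatchB_iff.mpr ⟨fun e => h1 e.symm, h2.symm⟩

theorem pvMatchB_partner {x a b : Char} (h1 : pvMatchB x a = true) (h2 : pvMatchB a b = true) : x = b := by
  obtain ⟨hne1, hl1⟩ := pvMatchB_iff.mp h1
  obtain ⟨hne2, hl2⟩ := pvMatchB_iff.mp h2
  have ex := pvLower_toNat x; have ea := pvLower_toNat a; have eb := pvLower_toNat b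
  rw [pvChar_eq_iff]
  split_ifs at ex ea eb <;> omega

theorem pvMatch_iff {c d : Char} (hc : pvLet c) (hd : pvLet d) : pvMatchA c d = pvMatchB c d := by
  have ec := pvLower_toNat c; have ed := pvLower_toNat d
  rcases hB : pvMatchB c d with _ | _
  · rcases hA : pvMatchA c d with _ | _
    · rfl
    · exfalso
      simp only [pvMatchA, Bool.or_eq_true, beq_iff_eq] at hA
      have : pvMatchB c d = true := by
        refine pvMatchB_iff.mpr ?_
        constructor
        · omega
        · rcases hc with hc | hc <;> rcases hd with hd | hd <;>
            split_ifs at ec ed <;> omega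
      rw [hB] at this; exact absurd this (by simp)
  · obtain ⟨hne, hl⟩ := pvMatchB_iff.mp hB
    simp only [pvMatchA, Bool.or_eq_true, beq_iff_eq]
    rcases hc with hc | hc <;> rcases hd with hd | hd <;>
      split_ifs at ec ed <;> omega

def pvNoAdj (l : List Char) : Prop := l.IsChain (fun a b => pvMatchB a b = false)

def pvRed (l : List Char) : List Char := (l.foldl pvStackStep []).reverse

theorem pvStep_noAdj {S : List Char} (h : pvNoAdj S) (c : Char) : pvNoAdj (pvStackStep S c) := by
  match S, h with
  | [], _ => simp [pvStackStep, pvNoAdj]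
  | t :: rest, h =>
    by_cases hm : pvMatchB t c = true
    · have e : pvStackStep (t :: rest) c = rest := by simp [pvStackStep, hm]
      rw [e]; exact h.tail
    · have e : pvStackStep (t :: rest) c = c :: t :: rest := by simp [pvStackStep, hm]
      rw [e]
      exact List.IsChain.cons h (fun y hy => by
        simp only [List.head?_cons, Option.mem_def, Option.some.injEq] at hy
        subst hy; rw [pvMatchB_symm]; simpa using hm)

theorem pvFoldl_noAdj {S : List Char} (h : pvNoAdj S) (l : List Char) : pvNoAdj (l.foldl pvStackStep S) := by
  induction l generalizing S with
  | nil => exact h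
  | cons c l ih => exact ih (pvStep_noAdj h c)

theorem pvStep_cancel {S : List Char} (h : pvNoAdj S) {a b : Char} (hab : pvMatchB a b = true) :
    pvStackStep (pvStackStep S a) b = S := by
  match S, h with
  | [], _ => simp [pvStackStep, hab]
  | t :: rest, h =>
    by_cases hm : pvMatchB t a = true
    · have htb : t = b := pvMatchB_partner hm hab
      subst htb
      simp only [pvStackStep, if_pos hm]
      match rest, h with
      | [], _ => rfl
      | u :: rest', h =>
        have hut : pvMatchB u t = false := by
          rw [pvMatchB_symm]; exact List.isChain_cons_cons.mp h |>.1
        simp [pvStackStep, hut]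
    · simp [pvStackStep, if_neg hm, hab]

theorem pvRed_cancel {a b : Char} (hab : pvMatchB a b = true) (u v : List Char) :
    pvRed (u ++ a :: b :: v) = pvRed (u ++ v) := by
  unfold pvRed
  rw [List.foldl_append, List.foldl_append]
  congr 1
  show List.foldl pvStackStep (pvStackStep (pvStackStep _ a) b) v = _
  rw [pvStep_cancel (pvFoldl_noAdj (by simp [pvNoAdj]) u) hab]

theorem pvFoldl_irr : ∀ (l S : List Char), pvNoAdj (S.reverse ++ l) → l.foldl pvStackStep S = l.reverse ++ S := by
  intro l
  induction l with
  | nil => intro S _; simp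
  | cons c l ih =>
    intro S h
    have hpush : pvStackStep S c = c :: S := by
      match S with
      | [] => rfl
      | t :: rest =>
        have : pvMatchB t c = false := by
          have := (List.isChain_append.mp h).2.2
          have ht : ((t :: rest).reverse).getLast? = some t := by simp
          simpa using this t (by simpa using ht) c rfl
        simp [pvStackStep, this]
    rw [List.foldl_cons, hpush]
    rw [ih (c :: S) (by simpa using h)]
    simp

theorem pvRed_irr {l : List Char} (h : pvNoAdj l) : pvRed l = l := by
  unfold pvRed
  rw [pvFoldl_irr l [] (by simpa using h)]
  simp

theorem pvMem_step {x c : Char} {S : List Char} (h : x ∈ pvStackStep S c) : x ∈ S ∨ x = c := by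
  match S with
  | [] =>
    rw [show pvStackStep [] c = [c] from rfl] at h
    simp at h; simp [h]
  | t :: rest =>
    by_cases hm : pvMatchB t c = true
    · rw [show pvStackStep (t :: rest) c = rest from by simp [pvStackStep, hm]] at h
      exact Or.inl (List.mem_cons_of_mem _ h)
    · rw [show pvStackStep (t :: rest) c = c :: t :: rest from by simp [pvStackStep, hm]] at h
      rcases List.mem_cons.mp h with h | h
      · exact Or.inr h
      · exact Or.inl h

theorem pvMem_foldl_step {x : Char} {S l : List Char} (h : x ∈ l.foldl pvStackStep S) : x ∈ S ∨ x ∈ l := by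
  induction l generalizing S with
  | nil => exact Or.inl h
  | cons c l ih =>
    rcases ih (S := pvStackStep S c) h with h' | h'
    · rcases pvMem_step h' with h'' | h''
      · exact Or.inl h''
      · simp [h'']
    · simp [h']

theorem pvPass_mem : ∀ (l : List Char) (c n : Nat) (x : Char), x ∈ pvPassAux l c n → x ∈ l := by
  intro l c n
  induction l, c, n using pvPassAux.induct with
  | case1 l c n hg hm ih =>
    intro x hx
    rw [pvPassAux, if_pos hg, if_pos hm] at hx
    rcases List.mem_append.mp (ih x hx) with h | h
    · exact List.mem_of_mem_take h
    · exact List.mem_of_mem_drop h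
  | case2 l c n hg hm ih =>
    intro x hx
    rw [pvPassAux, if_pos hg, if_neg hm] at hx
    exact ih x hx
  | case3 l c n hg =>
    intro x hx
    rwa [pvPassAux, if_neg hg] at hx

theorem pvPass_len : ∀ (l : List Char) (c n : Nat), n = l.length → (pvPassAux l c n).length ≤ l.length := by
  intro l c n
  induction l, c, n using pvPassAux.induct with
  | case1 l c n hg hm ih =>
    intro he
    rw [pvPassAux, if_pos hg, if_pos hm]
    have hlen : (l.take c ++ l.drop (c + 2)).length = l.length - 2 := by
      simp [List.length_take, List.length_drop]; omega
    have := ih (by omega)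
    omega
  | case2 l c n hg hm ih =>
    intro he
    rw [pvPassAux, if_pos hg, if_neg hm]
    exact ih he
  | case3 l c n hg =>
    intro he
    rw [pvPassAux, if_neg hg]

theorem pvPass_red : ∀ (l : List Char) (c n : Nat), n = l.length → (∀ ch ∈ l, pvLet ch) →
    pvRed (pvPassAux l c n) = pvRed l := by
  intro l c n
  induction l, c, n using pvPassAux.induct with
  | case1 l c n hg hm ih =>
    intro he hL
    subst he
    have hc2 : c + 2 ≤ l.length := by omega
    have hc : c < l.length := by omega
    have hc1 : c + 1 < l.length := by omega
    have hsplit : l.take c ++ l[c] :: l[c+1] :: l.drop (c + 2) = l := by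
      conv_rhs => rw [← List.take_append_drop c l]
      congr 1
      rw [List.drop_eq_getElem_cons hc, List.drop_eq_getElem_cons hc1]
    have hget0 : l.getD c ' ' = l[c] := List.getD_eq_getElem l ' ' hc
    have hget1 : l.getD (c+1) ' ' = l[c+1] := List.getD_eq_getElem l ' ' hc1
    have hmB : pvMatchB l[c] l[c+1] = true := by
      rw [← pvMatch_iff (hL _ (List.getElem_mem hc)) (hL _ (List.getElem_mem hc1))]
      rw [hget0, hget1] at hm
      exact hm
    rw [pvPassAux, if_pos hg, if_pos hm]
    rw [ih (by simp [List.length_take, List.length_drop]; omega)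
        (fun ch hch => by
          rcases List.mem_append.mp hch with h | h
          · exact hL ch (List.mem_of_mem_take h)
          · exact hL ch (List.mem_of_mem_drop h))]
    rw [← pvRed_cancel hmB (l.take c) (l.drop (c+2)), hsplit]
  | case2 l c n hg hm ih =>
    intro he hL
    rw [pvPassAux, if_pos hg, if_neg hm]
    exact ih he hL
  | case3 l c n hg =>
    intro he hL
    rw [pvPassAux, if_neg hg]

theorem pvPass_eq_self_irr : ∀ (l : List Char) (c n : Nat), n = l.length → pvPassAux l c n = l →
    ∀ i : Nat, c ≤ i → (hi : i + 1 < l.length) → pvMatchA l[i] l[i+1] = false := by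
  intro l c n
  induction l, c, n using pvPassAux.induct with
  | case1 l c n hg hm ih =>
    intro he heq
    exfalso
    rw [pvPassAux, if_pos hg, if_pos hm] at heq
    have h1 : (pvPassAux (l.take c ++ l.drop (c + 2)) (c+1) (n-2)).length ≤ (l.take c ++ l.drop (c + 2)).length :=
      pvPass_len _ _ _ (by simp [List.length_take, List.length_drop]; omega)
    rw [heq] at h1
    simp [List.length_take, List.length_drop] at h1
    omega
  | case2 l c n hg hm ih =>
    intro he heq i hci hi
    rw [pvPassAux, if_pos hg, if_neg hm] at heq
    rcases Nat.eq_or_lt_of_le hci with h | h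
    · subst h
      rw [List.getD_eq_getElem l ' ' (by omega), List.getD_eq_getElem l ' ' hi] at hm
      simpa using hm

    · exact ih he heq i (by omega) hi
  | case3 l c n hg =>
    intro he heq i hci hi
    omega

theorem pvPass_ne_len : ∀ (l : List Char) (c n : Nat), n = l.length → pvPassAux l c n ≠ l →
    (pvPassAux l c n).length + 2 ≤ l.length := by
  intro l c n
  induction l, c, n using pvPassAux.induct with
  | case1 l c n hg hm ih =>
    intro he hne
    rw [pvPassAux, if_pos hg, if_pos hm]
    have h1 : (pvPassAux (l.take c ++ l.drop (c + 2)) (c+1) (n-2)).length ≤ (l.take c ++ l.drop (c + 2)).length :=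
      pvPass_len _ _ _ (by simp [List.length_take, List.length_drop]; omega)
    simp only [List.length_append, List.length_take, List.length_drop] at h1
    omega
  | case2 l c n hg hm ih =>
    intro he hne
    rw [pvPassAux, if_pos hg, if_neg hm] at hne ⊢
    exact ih he hne
  | case3 l c n hg =>
    intro he hne
    exact absurd (by rw [pvPassAux, if_neg hg]) hne

theorem pvNoAdj_small {l : List Char} (h : l.length ≤ 1) : pvNoAdj l := by
  match l with
  | [] => simp [pvNoAdj]
  | [a] => simp [pvNoAdj]
  | a :: b :: t => simp at h

theorem pvIrr_of_pass_eq {l : List Char} (hL : ∀ ch ∈ l, pvLet ch)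
    (h : pvPassAux l 0 l.length = l) : pvNoAdj l := by
  rw [pvNoAdj, List.isChain_iff_getElem]
  intro i hi
  have hA := pvPass_eq_self_irr l 0 l.length rfl h i (Nat.zero_le i) hi
  rw [pvMatch_iff (hL _ (List.getElem_mem (by omega))) (hL _ (List.getElem_mem hi))] at hA
  exact hA

theorem pvFold_succ (k : Nat) : ∀ l : List Char,
    (List.range (k+1)).foldl (fun cur _ => pvPassAux cur 0 cur.length) l
      = (List.range k).foldl (fun cur _ => pvPassAux cur 0 cur.length) (pvPassAux l 0 l.length) := by
  induction k with
  | zero => intro l; rfl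
  | succ k ih =>
    intro l
    rw [List.range_succ, List.foldl_append, ih l, List.range_succ, List.foldl_append]
    rfl

theorem pvFold_fix (k : Nat) {l : List Char} (h : pvPassAux l 0 l.length = l) :
    (List.range k).foldl (fun cur _ => pvPassAux cur 0 cur.length) l = l := by
  induction k with
  | zero => rfl
  | succ k ih => rw [List.range_succ, List.foldl_append, ih]; simpa using h

theorem pvFoldPass_eq_red (k : Nat) : ∀ l : List Char, (∀ ch ∈ l, pvLet ch) → l.length ≤ 2 * k + 1 →
    (List.range k).foldl (fun cur _ => pvPassAux cur 0 cur.length) l = pvRed l := by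
  induction k with
  | zero =>
    intro l hL hlen
    simp only [List.range_zero, List.foldl_nil]
    exact (pvRed_irr (pvNoAdj_small (by omega))).symm
  | succ k ih =>
    intro l hL hlen
    rw [pvFold_succ]
    by_cases hFl : pvPassAux l 0 l.length = l
    · rw [hFl, pvFold_fix k hFl]
      exact (pvRed_irr (pvIrr_of_pass_eq hL hFl)).symm
    · have hlt := pvPass_ne_len l 0 l.length rfl hFl
      rw [ih _ (fun ch hch => hL ch (pvPass_mem _ _ _ ch hch)) (by omega)]
      exact pvPass_red l 0 l.length rfl hL

theorem pvWord_eq {w : String} (hL : ∀ c ∈ w.toList, pvLet c) : corrigir_palavra w = pvCorrectWord w := by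
  show String.ofList (((List.range (w.toList.length / 2)).foldl (fun cur _ => pvPassAux cur 0 cur.length) w.toList).foldl (fun acc c => acc ++ [c]) []) = _
  rw [PySem.List.foldl_append_singleton_eq_self]
  rw [pvFoldPass_eq_red _ _ hL (by omega)]
  rfl

def pvSigL (w : String) : List Char := PySem.List.sorted (PySem.Str.lower w).toList (fun c => c)

def pvSig (w : String) : String := String.ofList (pvSigL w)

theorem pvOfList_beq (a b : List Char) : (String.ofList a == String.ofList b) = (a == b) := by
  by_cases h : a = b
  · simp [h]
  · have h2 : ¬ String.ofList a = String.ofList b := fun e => h (String.ofList_inj.mp e)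
    simp [h, h2]

theorem pvAnagrama_eq (w x : String) : eh_anagrama w x = (pvSig w == pvSig x) := by
  show (if (PySem.Chars.join [] (((PySem.List.sorted (PySem.Str.lower w).toList (fun c => c))).map (fun c => [c]))
         == PySem.Chars.join [] (((PySem.List.sorted (PySem.Str.lower x).toList (fun c => c))).map (fun c => [c]))) then true else false) = _
  rw [PySem.Chars.join_nil_singletons, PySem.Chars.join_nil_singletons]
  rw [show (pvSig w == pvSig x) = ((PySem.List.sorted (PySem.Str.lower w).toList fun c => c) == PySem.List.sorted (PySem.Str.lower x).toList fun c => c) from pvOfList_beq _ _]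
  by_cases h : (PySem.List.sorted (PySem.Str.lower w).toList fun c => c) = (PySem.List.sorted (PySem.Str.lower x).toList fun c => c)
  · simp only [PySem.Str.toList_lower] at h
    simp [h]
  · simp only [PySem.Str.toList_lower] at h
    simp [h]

def pvMark1 (w x : String) : String :=
  if PySem.Str.lower w == PySem.Str.lower x then x
  else if eh_anagrama w x then "1" else x

theorem pvSet_getD_self {l : List String} {i : Nat} (h : i < l.length) :
    l.set i (l.getD i "") = l := by
  rw [List.getD_eq_getElem l "" h]
  exact List.set_getElem_self h

theorem pvInner_go (k : Nat) :
    ∀ (l : List String) (el i0 : Nat), i0 + k = l.length → el < i0 →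
      (PySem.List.pyRange (i0 : Int) (l.length : Int) 1).foldl (fun l i =>
        if PySem.Str.lower (PySem.List.pyGetD l (el : Int) "") == PySem.Str.lower (PySem.List.pyGetD l i "") then l
        else if eh_anagrama (PySem.List.pyGetD l (el : Int) "") (PySem.List.pyGetD l i "") then
          PySem.List.pySetD l i "1"
        else l) l
      = l.take i0 ++ (l.drop i0).map (pvMark1 (l.getD el "")) := by
  induction k with
  | zero =>
    intro l el i0 hk hel
    rw [PySem.List.pyRange_one_eq_nil (by omega)]
    simp only [List.foldl_nil]
    rw [show i0 = l.length by omega]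
    simp
  | succ k ih =>
    intro l el i0 hk hel
    have hi0 : i0 < l.length := by omega
    rw [PySem.List.pyRange_one_cons (by exact_mod_cast hi0)]
    rw [List.foldl_cons]
    set w := l.getD el "" with hw
    set x := l.getD i0 "" with hx
    have hstep : (if PySem.Str.lower (PySem.List.pyGetD l (el : Int) "") == PySem.Str.lower (PySem.List.pyGetD l (i0 : Int) "") then l
        else if eh_anagrama (PySem.List.pyGetD l (el : Int) "") (PySem.List.pyGetD l (i0 : Int) "") then
          PySem.List.pySetD l (i0 : Int) "1"
        else l) = l.set i0 (pvMark1 w x) := by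
      simp only [PySem.List.pyGetD_natCast, PySem.List.pySetD_natCast, ← hw, ← hx, pvMark1]
      split_ifs with h1 h2
      · rw [pvSet_getD_self hi0]
      · rfl
      · rw [pvSet_getD_self hi0]
    rw [hstep]
    set l' := l.set i0 (pvMark1 w x) with hl'
    have hlen' : l'.length = l.length := by simp [hl']
    have hih := ih l' el (i0 + 1) (by omega) (by omega)
    have hgd : l'.getD el "" = w := by
      rcases Nat.lt_or_ge el l.length with hlt | hge
      · rw [hl', List.getD_eq_getElem _ "" (by rw [List.length_set]; exact hlt),
          List.getElem_set_ne (by omega), hw, List.getD_eq_getElem l "" hlt]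
      · rw [hl', List.getD_eq_default _ "" (by rw [List.length_set]; exact hge), hw,
          List.getD_eq_default _ "" hge]
    rw [show ((i0 : Int) + 1) = ((i0 + 1 : Nat) : Int) by push_cast; ring]
    rw [← hlen', hih, hgd]
    have hlA : (l.take i0).length = i0 := by rw [List.length_take]; omega
    have htake : l'.take (i0 + 1) = l.take i0 ++ [pvMark1 w x] := by
      rw [hl', List.set_eq_take_cons_drop _ hi0]
      rw [show i0 + 1 = (l.take i0).length + 1 by omega]
      rw [List.take_append]
      simp
    have hdrop : l'.drop (i0 + 1) = l.drop (i0 + 1) := by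
      rw [hl', List.set_eq_take_cons_drop _ hi0]
      rw [show i0 + 1 = (l.take i0).length + 1 by omega]
      rw [List.drop_append]
      simp
    rw [htake, hdrop]
    have hsplit : l.drop i0 = x :: l.drop (i0 + 1) := by
      rw [List.drop_eq_getElem_cons hi0, hx, List.getD_eq_getElem l "" hi0]
    rw [hsplit]
    simp

def pvHMark : List String → List String
  | [] => []
  | w :: l => w :: pvHMark (l.map (pvMark1 w))
termination_by l => l.length
decreasing_by simpa using Nat.lt_succ_self _

theorem pvInnerApp_closed {l : List String} {el : Nat} (h : el + 1 ≤ l.length) :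
    pvInnerApp l (el : Int) (l.length : Int)
      = l.take (el + 1) ++ (l.drop (el + 1)).map (pvMark1 (l.getD el "")) := by
  unfold pvInnerApp
  rw [show ((el : Int) + 1) = ((el + 1 : Nat) : Int) by push_cast; ring]
  exact pvInner_go (l.length - (el + 1)) l el (el + 1) (by omega) (by omega)

theorem pvInnerApp_len {l : List String} {el : Nat} (h : el + 1 ≤ l.length) :
    (pvInnerApp l (el : Int) (l.length : Int)).length = l.length := by
  rw [pvInnerApp_closed h]
  simp [List.length_take, List.length_drop]
  omega

theorem pvSingleShift {cur : List String} {el : Nat} (h : el + 1 ≤ cur.length) (w : String) :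
    pvInnerApp (w :: cur) ((el + 1 : Nat) : Int) (((w :: cur).length : Int))
      = w :: pvInnerApp cur (el : Int) ((cur.length : Int)) := by
  rw [pvInnerApp_closed (by simp; omega), pvInnerApp_closed h]
  simp only [List.take_succ_cons, List.drop_succ_cons, List.getD_cons_succ, List.cons_append]

theorem pvShift (k : Nat) : ∀ (a : Nat) (w : String) (cur : List String), a + k ≤ cur.length →
    (PySem.List.pyRange ((a : Int) + 1) ((a : Int) + (k : Int) + 1) 1).foldl
        (fun l el => pvInnerApp l el ((cur.length : Int) + 1)) (w :: cur)
      = w :: (PySem.List.pyRange (a : Int) ((a : Int) + (k : Int)) 1).foldl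
        (fun l el => pvInnerApp l el (cur.length : Int)) cur := by
  induction k with
  | zero =>
    intro a w cur _
    rw [show ((a : Int) + (0 : Nat) + 1) = (a : Int) + 1 by push_cast; ring,
      show ((a : Int) + ((0 : Nat) : Int)) = (a : Int) by push_cast; ring]
    rw [PySem.List.pyRange_one_eq_nil (by omega), PySem.List.pyRange_one_eq_nil (by omega)]
    rfl
  | succ k ih =>
    intro a w cur hak
    have h1 : a + 1 ≤ cur.length := by omega
    rw [show ((a:Int) + ((k+1 : Nat) : Int) + 1) = ((a:Int)+1) + ((k:Int)+1) by push_cast; ring,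
      show ((a:Int) + ((k+1 : Nat) : Int)) = (a:Int) + ((k:Int)+1) by push_cast; ring]
    rw [PySem.List.pyRange_one_cons (a := (a : Int) + 1) (by omega)]
    rw [PySem.List.pyRange_one_cons (a := (a : Int)) (by omega)]
    rw [List.foldl_cons, List.foldl_cons]
    have hb : ((cur.length : Int) + 1) = (((w :: cur).length : Int)) := by simp
    have e1 : pvInnerApp (w :: cur) ((a : Int) + 1) ((cur.length : Int) + 1)
        = w :: pvInnerApp cur (a : Int) (cur.length : Int) := by
      rw [hb, show ((a : Int) + 1) = ((a + 1 : Nat) : Int) by push_cast; ring]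
      exact pvSingleShift h1 w
    rw [e1]
    set cur1 := pvInnerApp cur (a : Int) (cur.length : Int) with hcur1
    have hlen1 : cur1.length = cur.length := pvInnerApp_len h1
    have := ih (a + 1) w cur1 (by omega)
    rw [hlen1] at this
    push_cast at this ⊢
    ring_nf at this ⊢
    exact this

theorem pvAnagramMark_def (l : List String) : pvAnagramMark l
    = (PySem.List.pyRange 0 ((l.length : Int) - 1) 1).foldl (fun l' el => pvInnerApp l' el (l.length : Int)) l := rfl

theorem pvAnagramMark_eq_h : ∀ (l : List String), pvAnagramMark l = pvHMark l := by
  intro l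
  induction hn : l.length using Nat.strong_induction_on generalizing l with
  | _ n ih =>
  match l with
  | [] => simp [pvAnagramMark_def, pvHMark]
  | [w] =>
    rw [pvAnagramMark_def]
    rw [show (((([w] : List String).length : Int)) - 1) = 0 by simp]
    rw [PySem.List.pyRange_one_eq_nil (by omega)]
    simp [pvHMark]
  | w :: t0 :: t1 =>
    set t := t0 :: t1 with ht
    have htne : t.length ≥ 1 := by simp [ht]
    rw [pvAnagramMark_def]
    set m := t.length with hm
    have hlen : ((w :: t).length : Int) = (m : Int) + 1 := by simp [hm]
    rw [hlen]
    rw [show ((m : Int) + 1 - 1) = (m : Int) by ring]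
    rw [PySem.List.pyRange_one_cons (by omega : (0 : Int) < (m : Int))]
    rw [List.foldl_cons]
    have e0 : pvInnerApp (w :: t) (0 : Int) ((m : Int) + 1) = w :: t.map (pvMark1 w) := by
      rw [show ((0 : Int)) = ((0 : Nat) : Int) by simp, show ((m : Int) + 1) = (((w :: t).length : Int)) by simp [hm]]
      rw [pvInnerApp_closed (by simp)]
      simp
    rw [e0]
    set t' := t.map (pvMark1 w) with ht'
    have hlent' : t'.length = m := by simp [ht', hm]
    have hshift := pvShift (m - 1) 0 w t' (by omega)
    rw [show (((0 : Nat) : Int) + ((m - 1 : Nat) : Int) + 1) = (m : Int) by push_cast; omega] at hshift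
    rw [show (((0 : Nat) : Int) + 1) = (0 : Int) + 1 by simp] at hshift
    rw [show (((0 : Nat) : Int) + ((m - 1 : Nat) : Int)) = (m : Int) - 1 by push_cast; omega] at hshift
    rw [show (((0 : Nat) : Int)) = (0 : Int) by simp] at hshift
    rw [hlent'] at hshift
    rw [hshift]
    have : (PySem.List.pyRange 0 ((t'.length : Int) - 1) 1).foldl (fun l el => pvInnerApp l el (t'.length : Int)) t' = pvAnagramMark t' :=
      (pvAnagramMark_def t').symm
    rw [hlent'] at this
    rw [this]
    have hnn : n = t.length + 1 := by simpa using hn.symm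
    rw [ih t'.length (by rw [hlent', hm]; omega) t' rfl]
    conv_rhs => rw [pvHMark]

def pvGoodW (w : String) : Prop := ∀ c ∈ w.toList, pvLet c

def pvMarkK (K : List String) (x : String) : String :=
  if K.any (fun k => eh_anagrama k x && !(PySem.Str.lower k == PySem.Str.lower x)) then "1" else x

theorem pvLowerChar_letter {c : Char} (h : pvLet c) : 97 ≤ (PySem.Chars.lowerChar c).toNat ∧ (PySem.Chars.lowerChar c).toNat ≤ 122 := by
  have := pvLower_toNat c
  split_ifs at this <;> unfold pvLet at h <;> omega

theorem pvGood_ne_one {w : String} (h : pvGoodW w) : w ≠ "1" := by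
  intro he
  subst he
  have : '1' ∈ ("1" : String).toList := by simp
  have := h '1' this
  unfold pvLet at this
  simp [Char.toNat] at this

theorem pvBeq_comm (a b : String) : (a == b) = (b == a) := by
  by_cases h : a = b
  · simp [h]
  · simp [h, Ne.symm h]

theorem pvLowEq_one_right {w : String} (h : pvGoodW w) :
    (PySem.Str.lower w == PySem.Str.lower "1") = false := by
  rw [beq_eq_false_iff_ne]
  intro he
  have he' : (PySem.Str.lower w).toList = (PySem.Str.lower "1").toList := by rw [he]
  simp only [PySem.Str.toList_lower] at he'
  have h1 : ("1" : String).toList = ['1'] := by simp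
  rw [h1] at he'
  have h2 : PySem.Chars.lower ['1'] = ['1'] := by decide
  rw [h2] at he'
  have hlen : w.toList.length = 1 := by
    have := congrArg List.length he'
    simpa [PySem.Chars.lower] using this
  obtain ⟨c, hc⟩ := List.length_eq_one_iff.mp hlen
  rw [hc] at he'
  simp only [PySem.Chars.lower, List.map_cons, List.map_nil, List.cons.injEq] at he'
  have hcl := pvLowerChar_letter (h c (by rw [hc]; simp))
  rw [he'.1] at hcl
  simp [Char.toNat] at hcl

theorem pvSigL_one : pvSigL "1" = ['1'] := by
  unfold pvSigL
  have h1 : (PySem.Str.lower "1").toList = ['1'] := by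
    simp only [PySem.Str.toList_lower]
    have : ("1" : String).toList = ['1'] := by simp
    rw [this]
    decide
  rw [h1]
  decide

theorem pvAnag_one_right {w : String} (h : pvGoodW w) : eh_anagrama w "1" = false := by
  rw [pvAnagrama_eq, beq_eq_false_iff_ne]
  intro he
  have he' : pvSigL w = pvSigL "1" := String.ofList_inj.mp he
  rw [pvSigL_one] at he'
  have hmem : '1' ∈ pvSigL w := by rw [he']; simp
  unfold pvSigL at hmem
  rw [PySem.List.mem_sorted] at hmem
  simp only [PySem.Str.toList_lower, PySem.Chars.lower, List.mem_map] at hmem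
  obtain ⟨c, hcm, hcl⟩ := hmem
  have hcl' := pvLowerChar_letter (h c hcm)
  rw [hcl] at hcl'
  simp [Char.toNat] at hcl'

theorem pvMark1_one_left {x : String} (h : pvGoodW x) : pvMark1 "1" x = x := by
  unfold pvMark1
  rw [show (PySem.Str.lower "1" == PySem.Str.lower x) = false by
    rw [pvBeq_comm]; exact pvLowEq_one_right h]
  rw [show eh_anagrama "1" x = false by
    rw [pvAnagrama_eq, pvBeq_comm, ← pvAnagrama_eq]; exact pvAnag_one_right h]
  simp

theorem pvMark1_one_right (w : String) : pvMark1 w "1" = "1" := by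
  unfold pvMark1
  split_ifs <;> rfl

theorem pvMark_compose {K : List String} {w x : String} (hx : pvGoodW x) :
    pvMark1 w (pvMarkK K x) = pvMarkK (K ++ [w]) x := by
  unfold pvMarkK
  rcases hKx : K.any (fun k => eh_anagrama k x && !(PySem.Str.lower k == PySem.Str.lower x)) with _ | _
  · rw [if_neg (by simp)]
    simp only [List.any_append, hKx, Bool.false_or, List.any_cons, List.any_nil, Bool.or_false]
    unfold pvMark1
    by_cases h1 : (PySem.Str.lower w == PySem.Str.lower x) = true
    · rw [if_pos h1]
      have : (eh_anagrama w x && !(PySem.Str.lower w == PySem.Str.lower x)) = false := by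
        rw [h1]; simp
      rw [this]; simp
    · rw [if_neg h1]
      by_cases h2 : eh_anagrama w x = true
      · rw [if_pos h2]
        have : (eh_anagrama w x && !(PySem.Str.lower w == PySem.Str.lower x)) = true := by
          rw [h2, Bool.eq_false_iff.mpr h1]; rfl
        rw [this]; simp
      · rw [if_neg h2]
        have : (eh_anagrama w x && !(PySem.Str.lower w == PySem.Str.lower x)) = false := by
          rw [Bool.eq_false_iff.mpr h2]; rfl
        rw [this]; simp
  · rw [if_pos (by simp)]
    rw [if_pos (by simp [List.any_append, hKx])]
    exact pvMark1_one_right w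

theorem pvMarkK_kept_iff {K : List String} {w : String} :
    pvMarkK K w = w ∨ pvMarkK K w = "1" := by
  unfold pvMarkK
  split_ifs <;> simp

theorem pvSig_eq_of_anag {k w : String} (h : eh_anagrama k w = true) : pvSig k = pvSig w := by
  rw [pvAnagrama_eq] at h
  exact beq_iff_eq.mp h

theorem pvMark_compose_one {K : List String} {x : String} (hx : pvGoodW x) :
    pvMark1 "1" (pvMarkK K x) = pvMarkK K x := by
  rcases pvMarkK_kept_iff (K := K) (w := x) with h | h <;> rw [h]
  · exact pvMark1_one_left hx
  · exact pvMark1_one_right "1"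

theorem pvDictStep_eq (st : PySem.Dict String String × List String) (w : String) :
    pvDictStep st w =
      match st.1.get? (pvSig w) with
      | none => (st.1.insert (pvSig w) (PySem.Str.lower w), st.2 ++ [w])
      | some v => if v == PySem.Str.lower w then (st.1, st.2 ++ [w]) else (st.1, st.2) := rfl

theorem pvFind_singleton_pos {w s : String} (h : pvSig w = s) :
    ([w] : List String).find? (fun k => pvSig k == s) = some w :=
  List.find?_cons_of_pos (by rw [h]; exact beq_self_eq_true s)

theorem pvFind_singleton_neg {w s : String} (h : pvSig w ≠ s) :
    ([w] : List String).find? (fun k => pvSig k == s) = none := by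
  rw [List.find?_cons_of_neg (by simpa using h)]
  rfl

set_option maxHeartbeats 1000000 in
set_option maxHeartbeats 1000000 in
theorem pvMain : ∀ (l K : List String) (d : PySem.Dict String String) (out : List String),
    (∀ x ∈ l, pvGoodW x) → (∀ k ∈ K, pvGoodW k) →
    (∀ s : String, d.get? s = (K.find? (fun k => pvSig k == s)).map (fun k => PySem.Str.lower k)) →
    (∀ k1 ∈ K, ∀ k2 ∈ K, pvSig k1 = pvSig k2 → PySem.Str.lower k1 = PySem.Str.lower k2) →
    (pvHMark (l.map (pvMarkK K))).foldl (fun acc el => if el != "1" then acc ++ [el] else acc) out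
      = (l.foldl pvDictStep (d, out)).2 := by
  intro l
  induction l with
  | nil => intro K d out _ _ _ _; simp [pvHMark]
  | cons w l' ih =>
    intro K d out hG hKG hInv hKC
    have hGw : pvGoodW w := hG w (by simp)
    have hG' : ∀ x ∈ l', pvGoodW x := fun x hx => hG x (by simp [hx])
    rw [List.map_cons, List.foldl_cons]
    rw [show pvHMark (pvMarkK K w :: l'.map (pvMarkK K))
        = pvMarkK K w :: pvHMark ((l'.map (pvMarkK K)).map (pvMark1 (pvMarkK K w))) from by rw [pvHMark]]
    rw [List.foldl_cons, List.map_map]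
    have hsig : (PySem.Str.lower w) = PySem.Str.lower w := rfl
    rcases hKw : K.any (fun k => eh_anagrama k w && !(PySem.Str.lower k == PySem.Str.lower w)) with _ | _
    -- kept
    · have hmw : pvMarkK K w = w := by unfold pvMarkK; rw [hKw]; simp
      rw [hmw]
      have hone : (w != "1") = true := by
        simp only [bne_iff_ne]; exact pvGood_ne_one hGw
      rw [if_pos hone]
      have htail : (l'.map (pvMark1 w ∘ pvMarkK K)) = l'.map (pvMarkK (K ++ [w])) :=
        List.map_congr_left (fun x hx => pvMark_compose (hG' x hx))
      rw [htail]
      have hno : ∀ k ∈ K, (eh_anagrama k w && !(PySem.Str.lower k == PySem.Str.lower w)) = false := by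
        intro k hk
        have h1 := List.any_eq_false.mp hKw k hk
        simpa using h1
      have hKG' : ∀ k ∈ K ++ [w], pvGoodW k := by
        intro k hk
        rcases List.mem_append.mp hk with hk | hk
        · exact hKG k hk
        · simp at hk; subst hk; exact hGw
      rcases hf : K.find? (fun k => pvSig k == pvSig w) with _ | k0
      · -- no word with this signature yet: Source B inserts
        have hget : d.get? (pvSig w) = none := by rw [hInv, hf]; rfl
        have hstep : pvDictStep (d, out) w = (d.insert (pvSig w) (PySem.Str.lower w), out ++ [w]) := by
          rw [pvDictStep_eq]
          rw [show ((d, out).1.get? (pvSig w)) = none from hget]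
        rw [hstep]
        refine ih (K ++ [w]) _ (out ++ [w]) hG' hKG' ?_ ?_
        · intro s
          rw [PySem.Dict.get?_insert, List.find?_append]
          by_cases hs : s = pvSig w
          · subst hs
            rw [if_pos rfl, hf, pvFind_singleton_pos rfl]
            rfl
          · rw [if_neg hs, hInv s]
            rcases hf2 : K.find? (fun k => pvSig k == s) with _ | a
            · rw [pvFind_singleton_neg (fun e => hs e.symm)]
              rfl
            · rfl
        · intro a ha b hb hsigab
          have hnone := List.find?_eq_none.mp hf
          rcases List.mem_append.mp ha with h1 | h1 <;> rcases List.mem_append.mp hb with h2 | h2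
          · exact hKC a h1 b h2 hsigab
          · have hbw : b = w := by simpa using h2
            rw [hbw] at hsigab
            exact absurd (by simp [hsigab] : (pvSig a == pvSig w) = true) (by simpa using hnone a h1)
          · have haw : a = w := by simpa using h1
            rw [haw] at hsigab
            exact absurd (by simp [← hsigab] : (pvSig b == pvSig w) = true) (by simpa using hnone b h2)
          · have haw : a = w := by simpa using h1
            have hbw : b = w := by simpa using h2
            rw [haw, hbw]
      · -- signature present: its stored lowercase equals lower w, so Source B also keeps
        have hk0p := List.find?_some hf
        simp only [] at hk0p
        have hk0m : k0 ∈ K := List.mem_of_find?_eq_some hf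
        have hanag0 : eh_anagrama k0 w = true := by
          rw [pvAnagrama_eq]; exact hk0p
        have hlow0 : (PySem.Str.lower k0 == PySem.Str.lower w) = true := by
          have := hno k0 hk0m
          rw [hanag0] at this
          simpa using this
        have hget : d.get? (pvSig w) = some (PySem.Str.lower k0) := by
          rw [hInv, hf]; rfl
        have hstep : pvDictStep (d, out) w = (d, out ++ [w]) := by
          rw [pvDictStep_eq]
          rw [show ((d, out).1.get? (pvSig w)) = some (PySem.Str.lower k0) from hget]
          show (if (PySem.Str.lower k0 == PySem.Str.lower w) = true then ((d, out).1, (d, out).2 ++ [w]) else ((d, out).1, (d, out).2)) = _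
          rw [hlow0]
          simp
        rw [hstep]
        refine ih (K ++ [w]) d (out ++ [w]) hG' hKG' ?_ ?_
        · intro s
          rw [hInv s, List.find?_append]
          rcases hf2 : K.find? (fun k => pvSig k == s) with _ | a
          · have hws : pvSig w ≠ s := by
              intro e
              rw [show (fun k => pvSig k == s) = (fun k => pvSig k == pvSig w) from by rw [← e]] at hf2
              rw [hf2] at hf
              simp at hf
            rw [pvFind_singleton_neg hws]
            rfl
          · rfl
        · intro a ha b hb hsigab
          have hl0w : PySem.Str.lower k0 = PySem.Str.lower w := beq_iff_eq.mp hlow0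
          have hs0 : pvSig k0 = pvSig w := beq_iff_eq.mp hk0p
          rcases List.mem_append.mp ha with h1 | h1 <;> rcases List.mem_append.mp hb with h2 | h2
          · exact hKC a h1 b h2 hsigab
          · have hbw : b = w := by simp at h2; exact h2
            rw [hbw] at hsigab ⊢
            have := hKC a h1 k0 hk0m (by rw [hsigab, hs0])
            rw [this, hl0w]
          · have haw : a = w := by simp at h1; exact h1
            rw [haw] at hsigab ⊢
            have := hKC b h2 k0 hk0m (by rw [← hsigab, hs0])
            rw [this, hl0w]
          · have haw : a = w := by simp at h1; exact h1
            have hbw : b = w := by simp at h2; exact h2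
            rw [haw, hbw]
    -- dropped
    · have hmw : pvMarkK K w = "1" := by unfold pvMarkK; rw [hKw]; simp
      rw [hmw]
      rw [if_neg (by simp)]
      have htail : (l'.map (pvMark1 "1" ∘ pvMarkK K)) = l'.map (pvMarkK K) :=
        List.map_congr_left (fun x hx => pvMark_compose_one (hG' x hx))
      rw [htail]
      obtain ⟨k', hk'm, hk'p⟩ := List.any_eq_true.mp hKw
      have hanag : eh_anagrama k' w = true := by
        have := hk'p; simp only [Bool.and_eq_true] at this; exact this.1
      have hlne : (PySem.Str.lower k' == PySem.Str.lower w) = false := by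
        have := hk'p; simp only [Bool.and_eq_true] at this
        simpa using this.2
      have hsigeq : pvSig k' = pvSig w := pvSig_eq_of_anag hanag
      have hfind := hInv (pvSig w)
      rcases hf : K.find? (fun k => pvSig k == pvSig w) with _ | k0
      · exfalso
        have := List.find?_eq_none.mp hf k' hk'm
        simp [hsigeq] at this
      · have hk0p := List.find?_some hf
        simp only [] at hk0p
        have hk0m : k0 ∈ K := List.mem_of_find?_eq_some hf
        have hl0 : PySem.Str.lower k0 = PySem.Str.lower k' :=
          hKC k0 hk0m k' hk'm ((beq_iff_eq.mp hk0p).trans hsigeq.symm)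
        have hget : d.get? (pvSig w) = some (PySem.Str.lower k0) := by
          rw [hInv, hf]; rfl
        have hstep : pvDictStep (d, out) w = (d, out) := by
          rw [pvDictStep_eq]
          rw [show ((d, out).1.get? (pvSig w)) = some (PySem.Str.lower k0) from hget]
          show (if (PySem.Str.lower k0 == PySem.Str.lower w) = true then ((d, out).1, (d, out).2 ++ [w]) else ((d, out).1, (d, out).2)) = _
          rw [show (PySem.Str.lower k0 == PySem.Str.lower w) = false from by
            rw [hl0]; exact hlne]
          simp
        rw [hstep]
        exact ih K d out hG' hKG hInv hKC

theorem pvGo_nil (fuel : Nat) (cur : List Char) (acc : List (List Char)) :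
    PySem.Chars.splitOn.go [' '] (fuel+1) [] cur acc = (cur.reverse :: acc).reverse := rfl

theorem pvGo_cons (fuel : Nat) (ch : Char) (rest cur : List Char) (acc : List (List Char)) :
    PySem.Chars.splitOn.go [' '] (fuel+1) (ch::rest) cur acc
    = if [' '].isPrefixOf (ch::rest) = true then
        PySem.Chars.splitOn.go [' '] fuel (List.drop 1 (ch::rest)) [] (cur.reverse :: acc)
      else PySem.Chars.splitOn.go [' '] fuel rest (ch::cur) acc := rfl

theorem pvGo_chars (P : Char → Prop) : ∀ (fuel : Nat) (l cur : List Char) (acc : List (List Char)),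
    l.length < fuel → (∀ c ∈ cur, P c) → (∀ c ∈ l, c = ' ' ∨ P c) → (∀ w ∈ acc, ∀ c ∈ w, P c) →
    ∀ w ∈ PySem.Chars.splitOn.go [' '] fuel l cur acc, ∀ c ∈ w, P c := by
  intro fuel
  induction fuel with
  | zero => intro l cur acc hf; omega
  | succ fuel ih =>
    intro l cur acc hf hcur hl hacc w hw c hc
    match l, hl, hf with
    | [], hl, hf =>
      rw [pvGo_nil] at hw
      simp only [List.mem_reverse, List.mem_cons] at hw
      rcases hw with hw | hw
      · subst hw
        exact hcur c (List.mem_reverse.mp hc)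
      · exact hacc w hw c hc
    | ch :: rest, hl, hf =>
      rw [pvGo_cons] at hw
      by_cases hsp : [' '].isPrefixOf (ch :: rest) = true
      · rw [if_pos hsp] at hw
        have hf' : rest.length + 1 < fuel + 1 := by simpa using hf
        refine ih (List.drop 1 (ch :: rest)) [] (cur.reverse :: acc) (by simp; omega) (by simp) ?_ ?_ w hw c hc
        · intro c' hc'
          exact hl c' (List.mem_of_mem_drop hc')
        · intro w' hw' c' hc'
          rcases List.mem_cons.mp hw' with h | h
          · subst h
            exact hcur c' (List.mem_reverse.mp hc')
          · exact hacc w' h c' hc'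
      · rw [if_neg hsp] at hw
        have hch : ch ≠ ' ' := by
          intro he
          exact hsp (by rw [he]; simp [List.isPrefixOf])
        refine ih rest (ch :: cur) acc (by simpa using hf) ?_ (fun cc hcc => hl cc (by simp [hcc])) hacc w hw c hc
        intro cc hcc
        rcases List.mem_cons.mp hcc with h | h
        · rw [h]
          rcases hl ch (by simp) with h2 | h2
          · exact absurd h2 hch
          · exact h2
        · exact hcur cc h

theorem pvCorrect_good {w : String} (h : pvGoodW w) : pvGoodW (pvCorrectWord w) := by
  intro c hc
  unfold pvCorrectWord at hc
  rw [String.toList_ofList, List.mem_reverse] at hc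
  rcases pvMem_foldl_step hc with h' | h'
  · simp at h'
  · exact h c h'

theorem pvWords_eq (s : String) : (PySem.Str.split? s " ").getD []
    = (PySem.Chars.splitOn s.toList [' ']).map String.ofList := by
  have h1 : (" " : String).toList = [' '] := by simp
  simp [PySem.Str.split?, PySem.Chars.split?, h1]

theorem pvWords_good {s : String} (hPre : Pre_corrigir_doc s) :
    ∀ w ∈ (PySem.Str.split? s " ").getD [], pvGoodW w := by
  intro w hw
  rw [pvWords_eq] at hw
  obtain ⟨w', hw', rfl⟩ := List.mem_map.mp hw
  intro c hc
  rw [String.toList_ofList] at hc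
  have hl : ∀ c ∈ s.toList, c = ' ' ∨ pvLet c := by
    intro c' hc'
    have := List.all_eq_true.mp hPre.2.1 c' hc'
    simp only [Bool.or_eq_true, beq_iff_eq, Bool.and_eq_true, decide_eq_true_eq] at this
    unfold pvLet
    tauto
  exact pvGo_chars pvLet (s.toList.length + 1) s.toList [] [] (by omega) (by simp) hl (by simp) w' hw' c hc

theorem pvEquiv {s : String} (hPre : Pre_corrigir_doc s) : corrigir_doc s = corrigir_doc_alt s := by
  show PySem.Str.join " " ((pvAnagramMark (((PySem.Str.split? s " ").getD []).map corrigir_palavra)).foldl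
      (fun acc el => if el != "1" then acc ++ [el] else acc) ([] : List String))
    = PySem.Str.join " " ((((PySem.Str.split? s " ").getD []).foldl
      (fun st w => pvDictStep st (pvCorrectWord w)) (PySem.Dict.empty, ([] : List String))).2)
  set words := (PySem.Str.split? s " ").getD [] with hwords
  have hG : ∀ w ∈ words, pvGoodW w := pvWords_good hPre
  have hmap : words.map corrigir_palavra = words.map pvCorrectWord :=
    List.map_congr_left (fun w hw => pvWord_eq (hG w hw))
  rw [hmap]
  have hGcw : ∀ x ∈ words.map pvCorrectWord, pvGoodW x := by
    intro x hx
    obtain ⟨w, hw, rfl⟩ := List.mem_map.mp hx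
    exact pvCorrect_good (hG w hw)
  have hid : (words.map pvCorrectWord).map (pvMarkK []) = words.map pvCorrectWord := by
    rw [List.map_congr_left (fun x _ => by unfold pvMarkK; simp : ∀ x ∈ words.map pvCorrectWord, pvMarkK [] x = id x)]
    exact List.map_id _
  have hmain := pvMain (words.map pvCorrectWord) [] PySem.Dict.empty [] hGcw (by simp)
    (fun ssig => by simp) (by simp)
  rw [hid] at hmain
  rw [pvAnagramMark_eq_h, hmain, List.foldl_map]

-- ===== VERDICT (by name: the statement is the Claim_ definition above) =====
theorem corrigir_doc_spec : Claim_equal_corrigir_doc := by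
  intro cadeia_caracteres _ hPre
  show corrigir_doc cadeia_caracteres = corrigir_doc_alt cadeia_caracteres
  exact pvEquiv hPre
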